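-- pv_equiv track=rewrite | github.com/IKAROSOO/CodingTest | Programmers/힙/46286/46286_01.py | solution
-- ===== SOURCE A (Python) =====
-- def solution(scoville, K):
--     if min(scoville) >= K:
--         return 0
--
--     cnt = 1
--
--     while True:
--         if len(scoville) <= 1:
--             return -1
--
--         scoville.sort(reverse=True)
--         x = scoville.pop()
--         y = scoville.pop()
--
--         scoville.append(x + 2*y)
--
--         if min(scoville) < K:
--             cnt += 1
--             continue
--
--         return cnt
-- ===== SOURCE B (Python) =====
-- def solution(scoville, K):
--     # Sort once ascending; after each mix, re-insert the new value at its
--     # sorted position with a linear scan instead of re-sorting the list.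
--     a = sorted(scoville)
--     cnt = 0
--     while a[0] < K:
--         if len(a) < 2:
--             return -1
--         v = a[0] + 2 * a[1]
--         rest = a[2:]
--         i = 0
--         while i < len(rest) and rest[i] < v:
--             i += 1
--         rest.insert(i, v)
--         a = rest
--         cnt += 1
--     return cnt
-- ===== Notes on version B (the rewrite author's own statement) =====
-- stated objective: faster
-- what changed: A re-sorts the whole list (descending) on every iteration, pops the two smallest from the end and rescans for the minimum; B sorts once ascending and then keeps the list sorted by a single linear insertion of each mixed value, reading the two smallest off the front.
import Mathlib
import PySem

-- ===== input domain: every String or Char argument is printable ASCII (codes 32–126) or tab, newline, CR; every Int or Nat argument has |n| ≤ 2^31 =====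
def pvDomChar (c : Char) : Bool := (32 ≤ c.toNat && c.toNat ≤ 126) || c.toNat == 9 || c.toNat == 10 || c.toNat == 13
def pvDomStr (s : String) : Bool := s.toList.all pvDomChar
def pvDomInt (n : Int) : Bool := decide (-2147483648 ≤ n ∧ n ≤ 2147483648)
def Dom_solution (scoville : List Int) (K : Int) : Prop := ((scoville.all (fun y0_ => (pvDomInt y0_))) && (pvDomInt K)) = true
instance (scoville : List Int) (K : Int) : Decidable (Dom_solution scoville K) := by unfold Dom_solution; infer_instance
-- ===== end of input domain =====

-- B replaces A's per-iteration full re-sort with one initial ascending sort plus a linear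
-- sorted insertion of each mixed value (measured faster in a timing run). A mutates its
-- argument in place (sort/pop/append), B does not: the equivalence proved is about the RETURN value only.

-- ===== PORT A =====
-- A's while-loop: re-sort descending, pop the two smallest, append the mix, test min.
def solutionLoop (scoville : List Int) (K : Int) (cnt : Int) : Int :=
  if scoville.length ≤ 1 then -1
  else
    match h1 : PySem.List.pop? (PySem.List.sorted scoville (fun v => v) true) with
    | none => -1   -- unreachable: the sorted list is nonempty here
    | some (x, s1) =>
      match h2 : PySem.List.pop? s1 with
      | none => -1 -- unreachable: s1 has length ≥ 1 here
      | some (y, s2) =>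
        let l' := s2 ++ [x + 2 * y]
        match PySem.List.min? l' (fun v => v) with
        | none => -1 -- unreachable: l' is nonempty
        | some m => if m < K then solutionLoop l' K (cnt + 1) else cnt
termination_by scoville.length
decreasing_by
  have hs : (PySem.List.sorted scoville (fun v => v) true).length = scoville.length :=
    (PySem.List.sorted_perm scoville (fun v => v) true).length_eq
  have e1 := PySem.List.length_of_pop?_eq_some _ h1
  have e2 := PySem.List.length_of_pop?_eq_some _ h2
  simp only [List.length_append, List.length_cons, List.length_nil] at *
  omega

def solution (scoville : List Int) (K : Int) : Int :=
  match PySem.List.min? scoville (fun v => v) with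
  | none => 0    -- min([]) raises ValueError in Python; excluded by Pre_solution
  | some m => if m ≥ K then 0 else solutionLoop scoville K 1

-- ===== PORT B =====
-- B's inner scan: 'i = 0; while i < len(a) and a[i] < v: i += 1'
def insPos (a : List Int) (v : Int) : Nat :=
  match a with
  | [] => 0
  | r :: t => if r < v then insPos t v + 1 else 0

-- 'a.insert(i, v)' at the position found by the scan
def insertSorted (a : List Int) (v : Int) : List Int :=
  PySem.List.insert a ((insPos a v : Nat) : Int) v

-- B's while-loop: read the two smallest at the front, re-insert the mix in order.
def solutionAltLoop (a : List Int) (K : Int) (cnt : Int) : Int :=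
  match a with
  | [] => 0      -- unreachable under Pre_solution: Python's a[0] would raise IndexError
  | [x] => if x < K then -1 else cnt
  | x :: y :: rest =>
      if x < K then solutionAltLoop (insertSorted rest (x + 2 * y)) K (cnt + 1)
      else cnt
termination_by a.length
decreasing_by simp [insertSorted, PySem.List.length_insert]

def solution_alt (scoville : List Int) (K : Int) : Int :=
  solutionAltLoop (PySem.List.sorted scoville (fun v => v) false) K 0

-- ===== PRECONDITION & SPEC =====
-- Pre_ excludes only the empty list, on which A raises ValueError (min of empty sequence).
def Pre_solution (scoville : List Int) (K : Int) : Prop := scoville ≠ []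
instance (scoville : List Int) (K : Int) : Decidable (Pre_solution scoville K) := by unfold Pre_solution; infer_instance

def pvWitness_solution : List Int × Int := ([1, 2, 3, 9, 10, 12], 7)

def Spec_solution (scoville : List Int) (K : Int) (out : Int) : Prop := out = solution_alt scoville K
instance (scoville : List Int) (K : Int) (out : Int) : Decidable (Spec_solution scoville K out) := by unfold Spec_solution; infer_instance

-- ===== CLAIM (what is proved, stated in full; the proofs are below) =====
def Claim_equal_solution : Prop := ∀ (scoville : List Int) (K : Int), Dom_solution scoville K → Pre_solution scoville K → Spec_solution scoville K (solution scoville K)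

-- ===== LEMMAS AND PROOFS =====

lemma insPos_le (a : List Int) (v : Int) : insPos a v ≤ a.length := by
  induction a with
  | nil => simp [insPos]
  | cons r t ih => simp only [insPos, List.length_cons]; split <;> omega

lemma insertSorted_cons (r : Int) (t : List Int) (v : Int) :
    insertSorted (r :: t) v = if r < v then r :: insertSorted t v else v :: r :: t := by
  unfold insertSorted
  simp only [insPos]
  split
  · rw [PySem.List.insert_natCast _ _ _ (by simpa using insPos_le t v),
        PySem.List.insert_natCast _ _ _ (insPos_le t v)]
    simp
  · exact PySem.List.insert_zero _ _

lemma insertSorted_perm (a : List Int) (v : Int) : (insertSorted a v).Perm (v :: a) := by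
  induction a with
  | nil => simp [insertSorted, insPos, PySem.List.insert_zero]
  | cons r t ih =>
    rw [insertSorted_cons]
    split
    · exact ((ih.cons r).trans (List.Perm.swap v r t)).symm.symm
    · exact List.Perm.refl _

lemma insertSorted_pairwise (a : List Int) (v : Int)
    (h : a.Pairwise (· ≤ ·)) : (insertSorted a v).Pairwise (· ≤ ·) := by
  induction a with
  | nil => simp [insertSorted, insPos, PySem.List.insert_zero]
  | cons r t ih =>
    rw [insertSorted_cons]
    rcases List.pairwise_cons.mp h with ⟨hr, ht⟩
    split
    · refine List.pairwise_cons.mpr ⟨?_, ih ht⟩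
      intro z hz
      rcases List.mem_cons.mp ((insertSorted_perm t v).mem_iff.mp hz) with rfl | hz'
      · omega
      · exact hr z hz'
    · refine List.pairwise_cons.mpr ⟨?_, h⟩
      intro z hz
      rcases List.mem_cons.mp hz with rfl | hz'
      · omega
      · exact le_trans (by omega) (hr z hz')

lemma desc_eq_reverse_asc (l : List Int) :
    PySem.List.sorted l (fun v => v) true = (PySem.List.sorted l (fun v => v) false).reverse := by
  refine List.Perm.eq_of_pairwise (le := fun a b : Int => b ≤ a)
    (fun a b _ _ h1 h2 => le_antisymm h2 h1) ?_ ?_ ?_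
  · exact PySem.List.sorted_pairwise_rev l (fun v => v)
  · exact (List.pairwise_reverse).mpr (by simpa [flip] using PySem.List.sorted_pairwise l (fun v => v))
  · exact (PySem.List.sorted_perm l (fun v => v) true).trans
      ((PySem.List.sorted_perm l (fun v => v) false).symm.trans (List.reverse_perm _).symm)

lemma min?_eq_head_asc (l : List Int) (x : Int) (t : List Int)
    (h : PySem.List.sorted l (fun v => v) false = x :: t) :
    PySem.List.min? l (fun v => v) = some x := by
  cases hm : PySem.List.min? l (fun v => v) with
  | none =>
    have hl : l = [] := (PySem.List.min?_eq_none_iff _ _).mp hm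
    rw [(PySem.List.sorted_eq_nil_iff l (fun v => v) false).mpr hl] at h
    cases h
  | some m =>
    have hmem : m ∈ l := PySem.List.min?_mem hm
    have hmin : ∀ y ∈ l, m ≤ y := PySem.List.min?_isMin hm
    have hxmem : x ∈ l := by
      have hx' : x ∈ PySem.List.sorted l (fun v => v) false := by simp [h]
      exact (PySem.List.mem_sorted l (fun v => v) false x).mp hx'
    have hxle : ∀ y ∈ l, x ≤ y := PySem.List.key_head_sorted_le l (fun v => v) h
    have : m = x := le_antisymm (hmin x hxmem) (hxle m hmem)
    simp [this]

lemma loop_eq (K : Int) : ∀ (n : Nat) (l : List Int) (c : Int), l.length = n →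
    ∀ (x : Int) (t : List Int), PySem.List.sorted l (fun v => v) false = x :: t → x < K →
    solutionLoop l K (c + 1) = solutionAltLoop (x :: t) K c := by
  intro n
  induction n using Nat.strong_induction_on with
  | _ n ih =>
    intro l c hn x t hasc hx
    have hlen : l.length = t.length + 1 := by
      have := (PySem.List.sorted_perm l (fun v => v) false).length_eq
      rw [hasc] at this; simpa using this.symm
    match t with
    | [] =>
      rw [solutionLoop, solutionAltLoop]
      simp [hlen, hx]
    | y :: rest =>
      have hlen2 : ¬ l.length ≤ 1 := by simp at hlen; omega
      have hdesc : PySem.List.sorted l (fun v => v) true = rest.reverse ++ [y] ++ [x] := by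
        rw [desc_eq_reverse_asc, hasc]; simp
      have hpw : (x :: y :: rest).Pairwise (fun p q : Int => p ≤ q) := by
        have := PySem.List.sorted_pairwise l (fun v => v)
        rwa [hasc] at this
      have hpwrest : rest.Pairwise (fun p q : Int => p ≤ q) :=
        (List.pairwise_cons.mp (List.pairwise_cons.mp hpw).2).2
      have hperm : (insertSorted rest (x + 2 * y)).Perm (rest.reverse ++ [x + 2 * y]) :=
        (insertSorted_perm rest (x + 2 * y)).trans
          ((List.perm_append_singleton (x + 2 * y) rest).symm.trans
            (((List.reverse_perm rest).symm.append_right [x + 2 * y])))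
      have hasc' : PySem.List.sorted (rest.reverse ++ [x + 2 * y]) (fun w => w) false
          = insertSorted rest (x + 2 * y) :=
        PySem.List.sorted_id_eq_of_perm_of_pairwise _ _ hperm
          (insertSorted_pairwise rest (x + 2 * y) hpwrest)
      obtain ⟨z, t', hzt⟩ : ∃ z t', insertSorted rest (x + 2 * y) = z :: t' := by
        cases hc : insertSorted rest (x + 2 * y) with
        | nil =>
          have := hperm.length_eq
          simp [hc] at this
        | cons z t' => exact ⟨z, t', rfl⟩
      have hmin : PySem.List.min? (rest.reverse ++ [x + 2 * y]) (fun w => w) = some z :=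
        min?_eq_head_asc _ z t' (by rw [hasc', hzt])
      rw [solutionLoop, if_neg hlen2, hdesc]
      split
      next h1 => rw [PySem.List.pop?_last] at h1; cases h1
      next x1 s1 h1 =>
        rw [PySem.List.pop?_last] at h1
        injection h1 with hp
        injection hp with hx1 hs1
        subst hx1; subst hs1
        split
        next h2 => rw [PySem.List.pop?_last] at h2; cases h2
        next y1 s2 h2 =>
          rw [PySem.List.pop?_last] at h2
          injection h2 with hp2
          injection hp2 with hy1 hs2
          subst hy1; subst hs2
          simp only [hmin]
          show (if z < K then solutionLoop (rest.reverse ++ [x + 2 * y]) K (c + 1 + 1) else c + 1)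
              = solutionAltLoop (x :: y :: rest) K c
          by_cases hzK : z < K
          · rw [if_pos hzK]
            have hlt : (rest.reverse ++ [x + 2 * y]).length < n := by
              simp at hlen ⊢; omega
            have hrec := ih _ hlt (rest.reverse ++ [x + 2 * y]) (c + 1) rfl z t'
              (by rw [hasc', hzt]) hzK
            rw [hrec, solutionAltLoop, if_pos hx, ← hzt]
          · rw [if_neg hzK]
            rw [solutionAltLoop, if_pos hx, hzt]
            match t' with
            | [] => rw [solutionAltLoop]; simp [hzK]
            | w :: t'' => rw [solutionAltLoop]; simp [hzK]

-- ===== VERDICT (by name: the statement is the Claim_ definition above) =====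
theorem solution_spec : Claim_equal_solution := by
  intro scoville K _hdom hpre
  unfold Spec_solution solution solution_alt
  cases hasc : PySem.List.sorted scoville (fun v => v) false with
  | nil =>
    exact absurd ((PySem.List.sorted_eq_nil_iff _ _ _).mp hasc) hpre
  | cons x t =>
    rw [min?_eq_head_asc scoville x t hasc]
    show (if x ≥ K then (0 : Int) else solutionLoop scoville K 1) = solutionAltLoop (x :: t) K 0
    by_cases hxK : x < K
    · rw [if_neg (by omega)]
      exact loop_eq K scoville.length scoville 0 rfl x t hasc hxK
    · rw [if_pos (by omega)]
      match t with
      | [] => rw [solutionAltLoop]; simp [hxK]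
      | y :: rest => rw [solutionAltLoop]; simp [hxK]
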